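-- pv_equiv track=rewrite | github.com/menevia16a/WowheadLootExtractor | utils/utils.py | extract_objects_from_array_str
-- ===== SOURCE A (Python) =====
-- def extract_objects_from_array_str(s):
--     """
--     Extract individual JSON-like objects from a JavaScript array string.
--
--     Uses brace-matching to reliably extract top-level objects without
--     requiring strict JSON parsing.
--
--     Args:
--         s: Array string content
--
--     Returns:
--         List of object strings
--     """
--     objs = []
--     i = 0
--     n = len(s)
--
--     while i < n:
--         ch = s[i]
--
--         if ch == '{':
--             start = i
--             i += 1
--             depth = 1
--             in_str = None
--             esc = False
--
--             while i < n and depth > 0: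
--                 c = s[i]
--
--                 if in_str:
--                     if esc:
--                         esc = False
--                     elif c == '\\':
--                         esc = True
--                     elif c == in_str:
--                         in_str = None
--                 else:
--                     if c == '"' or c == "'":
--                         in_str = c
--                     elif c == '{':
--                         depth += 1
--                     elif c == '}':
--                         depth -= 1
--
--                 i += 1
--
--             objs.append(s[start:i])
--         else:
--             i += 1
--
--     return objs
-- ===== SOURCE B (Python) =====
-- def extract_objects_from_array_str(s):
--     """Single flat scan with explicit depth/in_str/esc state instead of nested loops."""
--     objs = []
--     depth = 0
--     in_str = None
--     esc = False
--     cur = []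
--     for ch in s:
--         if depth == 0:
--             if ch == '{':
--                 cur = [ch]
--                 depth = 1
--                 in_str = None
--                 esc = False
--         else:
--             cur.append(ch)
--             if in_str:
--                 if esc:
--                     esc = False
--                 elif ch == '\\':
--                     esc = True
--                 elif ch == in_str:
--                     in_str = None
--             else:
--                 if ch == '"' or ch == "'":
--                     in_str = ch
--                 elif ch == '{':
--                     depth += 1
--                 elif ch == '}':
--                     depth -= 1
--                     if depth == 0:
--                         objs.append(''.join(cur))
--     if depth > 0:
--         objs.append(''.join(cur))
--     return objs
-- ===== Notes on version B (the rewrite author's own statement) =====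
-- stated objective: simpler
-- what changed: Replaced the nested outer-scan/inner-consume loops with one flat loop over the characters that keeps depth/in_str/esc state and a current buffer, emitting an object whenever depth returns to 0 (and the unfinished buffer at end of input).
import Mathlib
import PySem

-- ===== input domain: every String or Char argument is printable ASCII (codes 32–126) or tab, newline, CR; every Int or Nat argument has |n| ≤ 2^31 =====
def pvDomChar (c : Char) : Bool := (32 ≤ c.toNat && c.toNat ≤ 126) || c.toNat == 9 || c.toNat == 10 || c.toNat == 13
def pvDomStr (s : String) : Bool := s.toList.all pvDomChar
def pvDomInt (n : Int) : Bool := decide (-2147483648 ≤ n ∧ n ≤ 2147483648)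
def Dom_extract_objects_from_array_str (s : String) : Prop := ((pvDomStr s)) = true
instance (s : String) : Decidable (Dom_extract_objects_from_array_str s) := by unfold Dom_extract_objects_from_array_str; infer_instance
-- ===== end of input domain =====

-- B replaces A's nested outer-scan/inner-consume loops by one flat state-machine pass (simpler; return value only).

-- ===== PORT A =====
-- A's inner while-loop: consumes characters while depth > 0, tracking in_str/esc;
-- returns (consumed characters, remaining characters).
def pvInnerA : List Char → Nat → Option Char → Bool → List Char × List Char
  | cs, 0, _, _ => ([], cs)
  | [], _ + 1, _, _ => ([], [])
  | c :: rest, d + 1, instr, esc =>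
    match instr with
    | some q =>
      if esc then
        (c :: (pvInnerA rest (d + 1) (some q) false).1, (pvInnerA rest (d + 1) (some q) false).2)
      else if c == '\\' then
        (c :: (pvInnerA rest (d + 1) (some q) true).1, (pvInnerA rest (d + 1) (some q) true).2)
      else if c == q then
        (c :: (pvInnerA rest (d + 1) none false).1, (pvInnerA rest (d + 1) none false).2)
      else
        (c :: (pvInnerA rest (d + 1) (some q) false).1, (pvInnerA rest (d + 1) (some q) false).2)
    | none =>
      if c == '"' || c == '\'' then
        (c :: (pvInnerA rest (d + 1) (some c) esc).1, (pvInnerA rest (d + 1) (some c) esc).2)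
      else if c == '{' then
        (c :: (pvInnerA rest (d + 2) none esc).1, (pvInnerA rest (d + 2) none esc).2)
      else if c == '}' then
        (c :: (pvInnerA rest d none esc).1, (pvInnerA rest d none esc).2)
      else
        (c :: (pvInnerA rest (d + 1) none esc).1, (pvInnerA rest (d + 1) none esc).2)

-- A's outer while-loop: skip until '{', then run the inner loop and append the slice.
-- (fuel = remaining length bound, only to make the recursion structural; never exhausted on fuel ≥ length)
def pvOuterA : Nat → List Char → List (List Char)
  | 0, _ => []
  | _ + 1, [] => []
  | fuel + 1, c :: rest =>
    if c == '{' then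
      let p := pvInnerA rest 1 none false
      ('{' :: p.1) :: pvOuterA fuel p.2
    else pvOuterA fuel rest

def extract_objects_from_array_str (s : String) : List String :=
  (pvOuterA s.toList.length s.toList).map String.ofList

-- ===== PORT B =====
structure PvBState where
  objs : List (List Char)
  depth : Nat
  instr : Option Char
  esc : Bool
  cur : List Char
deriving Repr

-- one step of B's flat loop
def pvAltStep (st : PvBState) (c : Char) : PvBState :=
  if st.depth == 0 then
    if c == '{' then ⟨st.objs, 1, none, false, [c]⟩ else st
  else
    let cur' := st.cur ++ [c]
    match st.instr with
    | some q =>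
      if st.esc then ⟨st.objs, st.depth, some q, false, cur'⟩
      else if c == '\\' then ⟨st.objs, st.depth, some q, true, cur'⟩
      else if c == q then ⟨st.objs, st.depth, none, false, cur'⟩
      else ⟨st.objs, st.depth, some q, false, cur'⟩
    | none =>
      if c == '"' || c == '\'' then ⟨st.objs, st.depth, some c, st.esc, cur'⟩
      else if c == '{' then ⟨st.objs, st.depth + 1, none, st.esc, cur'⟩
      else if c == '}' then
        if st.depth - 1 == 0 then ⟨st.objs ++ [cur'], 0, none, st.esc, cur'⟩
        else ⟨st.objs, st.depth - 1, none, st.esc, cur'⟩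
      else ⟨st.objs, st.depth, none, st.esc, cur'⟩

def extract_objects_from_array_str_alt (s : String) : List String :=
  let st := s.toList.foldl pvAltStep ⟨[], 0, none, false, []⟩
  (if st.depth > 0 then st.objs ++ [st.cur] else st.objs).map String.ofList

-- ===== PRECONDITION & SPEC =====
def Spec_extract_objects_from_array_str (s : String) (out : List String) : Prop := out = extract_objects_from_array_str_alt s
instance (s : String) (out : List String) : Decidable (Spec_extract_objects_from_array_str s out) := by unfold Spec_extract_objects_from_array_str; infer_instance

-- ===== CLAIM (what is proved, stated in full; the proofs are below) =====
def Claim_equal_extract_objects_from_array_str : Prop := ∀ (s : String), Dom_extract_objects_from_array_str s → Spec_extract_objects_from_array_str s (extract_objects_from_array_str s)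

-- ===== LEMMAS AND PROOFS =====
def pvFin (st : PvBState) : List (List Char) :=
  if st.depth > 0 then st.objs ++ [st.cur] else st.objs

theorem pvInnerA_snd_length_le (cs : List Char) (d : Nat) (instr : Option Char) (esc : Bool) :
    (pvInnerA cs d instr esc).2.length ≤ cs.length := by
  fun_induction pvInnerA cs d instr esc <;> simp_all <;> omega

theorem pv_main : ∀ (n : Nat) (cs : List Char), cs.length ≤ n →
    (∀ (f : Nat), cs.length ≤ f → ∀ objs instr esc cur,
      pvFin (cs.foldl pvAltStep ⟨objs, 0, instr, esc, cur⟩) = objs ++ pvOuterA f cs)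
    ∧ (∀ d instr esc (f : Nat), (pvInnerA cs (d + 1) instr esc).2.length ≤ f →
      ∀ objs cur,
      pvFin (cs.foldl pvAltStep ⟨objs, d + 1, instr, esc, cur⟩)
        = objs ++ [cur ++ (pvInnerA cs (d + 1) instr esc).1]
            ++ pvOuterA f (pvInnerA cs (d + 1) instr esc).2) := by
  intro n
  induction n with
  | zero =>
    intro cs hcs
    have hnil : cs = [] := List.eq_nil_of_length_eq_zero (Nat.le_zero.mp hcs)
    subst hnil
    exact ⟨fun f hf objs instr esc cur => by cases f <;> simp [pvFin, pvOuterA],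
           fun d instr esc f hf objs cur => by cases f <;> simp [pvFin, pvInnerA, pvOuterA]⟩
  | succ n ih =>
    intro cs hcs
    cases cs with
    | nil =>
      exact ⟨fun f hf objs instr esc cur => by cases f <;> simp [pvFin, pvOuterA],
             fun d instr esc f hf objs cur => by cases f <;> simp [pvFin, pvInnerA, pvOuterA]⟩
    | cons c rest =>
      have hr : rest.length ≤ n := by simpa using hcs
      constructor
      · intro f hf objs instr esc cur
        obtain ⟨f', rfl⟩ : ∃ f', f = f' + 1 := ⟨f - 1, by simp at hf; omega⟩
        have hf' : rest.length ≤ f' := by simpa using hf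
        rw [List.foldl_cons]
        by_cases hc : c = '{'
        · have hstep : pvAltStep ⟨objs, 0, instr, esc, cur⟩ c = ⟨objs, 1, none, false, [c]⟩ := by
            simp [pvAltStep, hc]
          rw [hstep, (ih rest hr).2 0 none false f'
            (le_trans (pvInnerA_snd_length_le rest 1 none false) hf') objs [c]]
          simp [pvOuterA, hc]
        · have hstep : pvAltStep ⟨objs, 0, instr, esc, cur⟩ c = ⟨objs, 0, instr, esc, cur⟩ := by
            simp [pvAltStep, hc]
          rw [hstep, (ih rest hr).1 f' hf' objs instr esc cur]
          simp [pvOuterA, hc]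
      · intro d instr esc f hf objs cur
        rw [List.foldl_cons]
        match instr with
        | some q =>
          by_cases he : esc = true
          · have hstep : pvAltStep ⟨objs, d + 1, some q, esc, cur⟩ c
                = ⟨objs, d + 1, some q, false, cur ++ [c]⟩ := by simp [pvAltStep, he]
            have hf' : (pvInnerA rest (d + 1) (some q) false).2.length ≤ f := by
              simpa [pvInnerA, he] using hf
            rw [hstep, (ih rest hr).2 d (some q) false f hf' objs (cur ++ [c])]
            simp [pvInnerA, he]
          · have he' : esc = false := by simpa using he
            subst he'
            by_cases hb : c = '\\'
            · have hstep : pvAltStep ⟨objs, d + 1, some q, false, cur⟩ c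
                  = ⟨objs, d + 1, some q, true, cur ++ [c]⟩ := by simp [pvAltStep, hb]
              have hf' : (pvInnerA rest (d + 1) (some q) true).2.length ≤ f := by
                simpa [pvInnerA, hb] using hf
              rw [hstep, (ih rest hr).2 d (some q) true f hf' objs (cur ++ [c])]
              simp [pvInnerA, hb]
            · by_cases hq : c = q
              · subst hq
                have hstep : pvAltStep ⟨objs, d + 1, some c, false, cur⟩ c
                    = ⟨objs, d + 1, none, false, cur ++ [c]⟩ := by simp [pvAltStep, hb]
                have hf' : (pvInnerA rest (d + 1) none false).2.length ≤ f := by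
                  simpa [pvInnerA, hb] using hf
                rw [hstep, (ih rest hr).2 d none false f hf' objs (cur ++ [c])]
                simp [pvInnerA, hb]
              · have hstep : pvAltStep ⟨objs, d + 1, some q, false, cur⟩ c
                    = ⟨objs, d + 1, some q, false, cur ++ [c]⟩ := by simp [pvAltStep, hb, hq]
                have hf' : (pvInnerA rest (d + 1) (some q) false).2.length ≤ f := by
                  simpa [pvInnerA, hb, hq] using hf
                rw [hstep, (ih rest hr).2 d (some q) false f hf' objs (cur ++ [c])]
                simp [pvInnerA, hb, hq]
        | none =>
          by_cases hs : c = '"' ∨ c = '\''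
          · rcases hs with h | h
            · subst h
              have hstep : pvAltStep ⟨objs, d + 1, none, esc, cur⟩ '"'
                  = ⟨objs, d + 1, some '"', esc, cur ++ ['"']⟩ := by simp [pvAltStep]
              have hf' : (pvInnerA rest (d + 1) (some '"') esc).2.length ≤ f := by
                simpa [pvInnerA] using hf
              rw [hstep, (ih rest hr).2 d (some '"') esc f hf' objs (cur ++ ['"'])]
              simp [pvInnerA]
            · subst h
              have hstep : pvAltStep ⟨objs, d + 1, none, esc, cur⟩ '\''
                  = ⟨objs, d + 1, some '\'', esc, cur ++ ['\'']⟩ := by simp [pvAltStep]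
              have hf' : (pvInnerA rest (d + 1) (some '\'') esc).2.length ≤ f := by
                simpa [pvInnerA] using hf
              rw [hstep, (ih rest hr).2 d (some '\'') esc f hf' objs (cur ++ ['\''])]
              simp [pvInnerA]
          · rw [not_or] at hs
            obtain ⟨hs1, hs2⟩ := hs
            by_cases ho : c = '{'
            · have hstep : pvAltStep ⟨objs, d + 1, none, esc, cur⟩ c
                  = ⟨objs, d + 2, none, esc, cur ++ [c]⟩ := by simp [pvAltStep, hs1, hs2, ho]
              have hf' : (pvInnerA rest (d + 1 + 1) none esc).2.length ≤ f := by
                simpa [pvInnerA, hs1, hs2, ho] using hf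
              rw [hstep, (ih rest hr).2 (d + 1) none esc f hf' objs (cur ++ [c])]
              simp [pvInnerA, hs1, hs2, ho]
            · by_cases hcl : c = '}'
              · cases d with
                | zero =>
                  have hstep : pvAltStep ⟨objs, 1, none, esc, cur⟩ c
                      = ⟨objs ++ [cur ++ [c]], 0, none, esc, cur ++ [c]⟩ := by
                    simp [pvAltStep, hs1, hs2, ho, hcl]
                  have hf' : rest.length ≤ f := by
                    simpa [pvInnerA, hs1, hs2, ho, hcl] using hf
                  rw [hstep, (ih rest hr).1 f hf' (objs ++ [cur ++ [c]]) none esc (cur ++ [c])]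
                  simp [pvInnerA, hs1, hs2, ho, hcl]
                | succ d' =>
                  have hstep : pvAltStep ⟨objs, d' + 1 + 1, none, esc, cur⟩ c
                      = ⟨objs, d' + 1, none, esc, cur ++ [c]⟩ := by
                    simp [pvAltStep, hs1, hs2, ho, hcl]
                  have hf' : (pvInnerA rest (d' + 1) none esc).2.length ≤ f := by
                    simpa [pvInnerA, hs1, hs2, ho, hcl] using hf
                  rw [hstep, (ih rest hr).2 d' none esc f hf' objs (cur ++ [c])]
                  simp [pvInnerA, hs1, hs2, ho, hcl]
              · have hstep : pvAltStep ⟨objs, d + 1, none, esc, cur⟩ c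
                    = ⟨objs, d + 1, none, esc, cur ++ [c]⟩ := by
                  simp [pvAltStep, hs1, hs2, ho, hcl]
                have hf' : (pvInnerA rest (d + 1) none esc).2.length ≤ f := by
                  simpa [pvInnerA, hs1, hs2, ho, hcl] using hf
                rw [hstep, (ih rest hr).2 d none esc f hf' objs (cur ++ [c])]
                simp [pvInnerA, hs1, hs2, ho, hcl]

-- ===== VERDICT (by name: the statement is the Claim_ definition above) =====
theorem extract_objects_from_array_str_spec : Claim_equal_extract_objects_from_array_str := by
  intro s _
  unfold Spec_extract_objects_from_array_str extract_objects_from_array_str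
    extract_objects_from_array_str_alt
  exact congrArg (List.map String.ofList)
    (by simpa [pvFin] using ((pv_main s.toList.length s.toList le_rfl).1 s.toList.length le_rfl [] none false []).symm)
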